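-- pv_equiv track=rewrite | github.com/tahentx/pv_workbook | datascience/misc/autocomplete.py | duplicate_sandwich
-- ===== SOURCE A (Python) =====
-- def duplicate_sandwich(arr):
--     base = range(0, len(arr))
--     joined = zip([arr.index(a) for a in arr], base)
--     for member in joined:
--         if member[0] != member[1]:
--             front, back = member[0] + 1, member[1]
--             slice = arr[front:back]
--             return slice
-- ===== SOURCE B (Python) =====
-- def duplicate_sandwich(arr):
--     best = None
--     for v in dict.fromkeys(arr):
--         j = arr.index(v)
--         rest = arr[j + 1:]
--         if v in rest:
--             k = j + 1 + rest.index(v)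
--             if best is None or k < best[1]:
--                 best = (j, k)
--     if best is not None:
--         return arr[best[0] + 1:best[1]]
-- ===== Notes on version B (the rewrite author's own statement) =====
-- stated objective: alternative
-- what changed: Replaced A's position scan (zip of arr.index per element with positions, returning at the first mismatch) by a value-driven pass over the distinct values that computes each duplicated value's first and second occurrence and keeps the candidate with the smallest second occurrence.
import Mathlib
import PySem

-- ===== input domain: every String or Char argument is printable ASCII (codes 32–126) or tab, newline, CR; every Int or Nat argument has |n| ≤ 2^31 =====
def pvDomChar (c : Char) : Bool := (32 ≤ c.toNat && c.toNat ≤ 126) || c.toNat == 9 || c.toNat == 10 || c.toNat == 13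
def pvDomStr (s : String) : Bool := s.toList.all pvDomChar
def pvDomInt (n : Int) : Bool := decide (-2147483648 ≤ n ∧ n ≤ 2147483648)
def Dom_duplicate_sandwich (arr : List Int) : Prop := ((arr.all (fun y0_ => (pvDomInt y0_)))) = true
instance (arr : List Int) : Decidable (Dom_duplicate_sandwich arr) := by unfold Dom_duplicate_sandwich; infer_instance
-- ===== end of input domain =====

-- B replaces A's position-by-position scan (which compares each element's arr.index with its position)
-- by a value-driven pass over the DISTINCT values: it computes each duplicated value's first and second
-- occurrence and keeps the candidate with the smallest second occurrence (alternative algorithm).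

-- ===== PORT A =====
-- arr.index(a): a ∈ arr wherever A calls it, so index? is some; .getD 0 is never the default
def dsIdx (arr : List Int) (a : Int) : Int := (((PySem.List.index? arr a).getD 0 : Nat) : Int)

-- the 'for member in joined' loop: first member with member[0] ≠ member[1] returns the slice;
-- falling off the end = Python's implicit None
def dsLoopA (arr : List Int) : List (Int × Int) → Option (List Int)
  | [] => none
  | m :: rest =>
    if m.1 ≠ m.2 then
      some (PySem.List.slice arr (some (m.1 + 1)) (some m.2))
    else dsLoopA arr rest

def duplicate_sandwich (arr : List Int) : Option (List Int) :=
  let base := PySem.List.pyRange 0 (arr.length : Int) 1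
  let joined := (arr.map (dsIdx arr)).zip base
  dsLoopA arr joined

-- ===== PORT B =====
-- 'best is None or k < best[1]'
def dsBetter (k : Int) : Option (Int × Int) → Bool
  | none => true
  | some b => decide (k < b.2)

def dsLoopB (arr : List Int) : List Int → Option (Int × Int) → Option (Int × Int)
  | [], best => best
  | v :: vs, best =>
    let j : Int := (((PySem.List.index? arr v).getD 0 : Nat) : Int)
    let rest := PySem.List.slice arr (some (j + 1)) none
    if v ∈ rest then
      let k : Int := j + 1 + (((PySem.List.index? rest v).getD 0 : Nat) : Int)
      dsLoopB arr vs (if dsBetter k best then some (j, k) else best)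
    else dsLoopB arr vs best

def duplicate_sandwich_alt (arr : List Int) : Option (List Int) :=
  match dsLoopB arr (PySem.List.dedup arr) none with
  | some b => some (PySem.List.slice arr (some (b.1 + 1)) (some b.2))
  | none => none

-- ===== PRECONDITION & SPEC =====
def Spec_duplicate_sandwich (arr : List Int) (out : Option (List Int)) : Prop := out = duplicate_sandwich_alt arr
instance (arr : List Int) (out : Option (List Int)) : Decidable (Spec_duplicate_sandwich arr out) := by unfold Spec_duplicate_sandwich; infer_instance

-- ===== CLAIM (what is proved, stated in full; the proofs are below) =====
def Claim_equal_duplicate_sandwich : Prop := ∀ (arr : List Int), Dom_duplicate_sandwich arr → Spec_duplicate_sandwich arr (duplicate_sandwich arr)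

-- ===== LEMMAS AND PROOFS =====

-- every list is either duplicate-free or splits as (duplicate-free prefix) ++ repeated element :: rest
lemma ds_split (arr : List Int) :
    arr.Nodup ∨ ∃ p v s, arr = p ++ v :: s ∧ p.Nodup ∧ v ∈ p := by
  suffices h : ∀ (r l : List Int), l.reverse = r → l.Nodup ∨ ∃ p v s, l = p ++ v :: s ∧ p.Nodup ∧ v ∈ p from
    h arr.reverse arr rfl
  intro r
  induction r with
  | nil => intro l hl; left; simp [List.reverse_eq_nil_iff.mp hl]
  | cons x r' ih =>
    intro l hl
    have hl' : l = r'.reverse ++ [x] := by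
      have := congrArg List.reverse hl
      simpa using this
    rcases ih r'.reverse (by simp) with hnd | ⟨p, v, s, hys, hp, hv⟩
    · by_cases hx : x ∈ r'.reverse
      · exact Or.inr ⟨r'.reverse, x, [], hl', hnd, hx⟩
      · refine Or.inl (by
          rw [hl']
          rw [List.nodup_append]
          refine ⟨hnd, by simp, ?_⟩
          simp only [List.mem_reverse] at hx ⊢
          exact fun a ha b hb => by simp only [List.mem_singleton] at hb; subst hb; exact fun h => hx (h ▸ ha))
    · exact Or.inr ⟨p, v, s ++ [x], by rw [hl', hys]; simp, hp, hv⟩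

-- A's loop on a duplicate-free list never finds a mismatch
lemma dsLoopA_nodup (arr : List Int) (h : arr.Nodup) :
    ∀ (suf pre : List Int), arr = pre ++ suf →
      dsLoopA arr ((suf.map (dsIdx arr)).zip
        (PySem.List.pyRange (pre.length : Int) (arr.length : Int) 1)) = none := by
  intro suf
  induction suf with
  | nil => intro pre _; rfl
  | cons x rest ih =>
    intro pre harr
    have hlen : (pre.length : Int) < (arr.length : Int) := by simp only [harr, List.length_append, List.length_cons]; omega
    rw [PySem.List.pyRange_one_cons hlen]
    simp only [List.map_cons, List.zip_cons_cons]
    have hx : x ∉ pre := by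
      have := harr ▸ h
      rw [List.nodup_append] at this
      exact fun hm => (this.2.2 x hm x (by simp)) rfl
    have hidx : PySem.List.index? arr x = some pre.length :=
      (PySem.List.index?_eq_some_iff arr x pre.length).mpr ⟨pre, rest, harr, rfl, hx⟩
    rw [dsLoopA]
    simp only [dsIdx, hidx, Option.getD_some, ne_eq, not_true_eq_false, if_false]
    have := ih (pre ++ [x]) (by rw [harr]; simp)
    simpa [Int.add_comm] using this

-- A's loop finds the first repeated element at position p.length
lemma dsLoopA_eval (arr p s' : List Int) (v : Int) (j0 : Nat)
    (harr : arr = p ++ v :: s') (hp : p.Nodup)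
    (hj0 : PySem.List.index? p v = some j0) :
    ∀ (q pre : List Int), p = pre ++ q →
      dsLoopA arr (((q ++ v :: s').map (dsIdx arr)).zip
        (PySem.List.pyRange (pre.length : Int) (arr.length : Int) 1))
        = some (PySem.List.slice arr (some ((j0 : Int) + 1)) (some (p.length : Int))) := by
  obtain ⟨hj0lt, hgetv, -⟩ := PySem.List.getElem_of_index?_eq_some hj0
  have hv : v ∈ p := hgetv ▸ List.getElem_mem hj0lt
  have hvfirst : PySem.List.index? arr v = some j0 := by
    rw [harr, PySem.List.index?_append_of_mem _ hv, hj0]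
  intro q
  induction q with
  | nil =>
    intro pre hq
    have hpre : pre = p := by simpa using hq.symm
    subst hpre
    have hlen : (pre.length : Int) < (arr.length : Int) := by simp only [harr, List.length_append, List.length_cons]; omega
    rw [List.nil_append, PySem.List.pyRange_one_cons hlen]
    simp only [List.map_cons, List.zip_cons_cons]
    rw [dsLoopA]
    have hne : ((j0 : Nat) : Int) ≠ (pre.length : Int) := by exact_mod_cast Nat.ne_of_lt hj0lt
    simp only [dsIdx]
    rw [hvfirst]
    simp [hne]
  | cons x q' ih =>
    intro pre hq
    have hlen : (pre.length : Int) < (arr.length : Int) := by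
      rw [harr, hq]; simp; omega
    rw [List.cons_append, PySem.List.pyRange_one_cons hlen]
    simp only [List.map_cons, List.zip_cons_cons]
    have hx : x ∉ pre := by
      have := hq ▸ hp
      rw [List.nodup_append] at this
      exact fun hm => (this.2.2 x hm x (by simp)) rfl
    have hidx : PySem.List.index? arr x = some pre.length :=
      (PySem.List.index?_eq_some_iff arr x pre.length).mpr
        ⟨pre, q' ++ v :: s', by rw [harr, hq]; simp, rfl, hx⟩
    rw [dsLoopA]
    simp only [dsIdx, hidx, Option.getD_some, ne_eq, not_true_eq_false, if_false]
    have := ih (pre ++ [x]) (by rw [hq]; simp)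
    simpa [Int.add_comm] using this

-- two positions of a duplicate-free list never hold the same element
lemma nodup_ne (l : List Int) (h : l.Nodup) (i j : Nat) (hi : i < l.length) (hj : j < l.length)
    (hij : i < j) : l[i] ≠ l[j] :=
  (List.pairwise_iff_getElem.mp h) i j hi hj hij


-- the 'best is None or k < best[1]' update when the new candidate wins
lemma dsB_if_take (j L : Int) (best : Option (Int × Int))
    (h : ∀ b, best = some b → L < b.2) :
    (if dsBetter L best then some (j, L) else best) = some (j, L) := by
  cases best with
  | none => rfl
  | some b => simp [dsBetter, h b rfl]

lemma dsLoopB_nodup (arr : List Int) (h : arr.Nodup) :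
    ∀ (vs : List Int) (best : Option (Int × Int)), (∀ w ∈ vs, w ∈ arr) →
      dsLoopB arr vs best = best := by
  intro vs
  induction vs with
  | nil => intro best _; rfl
  | cons w ws ih =>
    intro best hmem
    have hw : w ∈ arr := hmem w (by simp)
    obtain ⟨jn, hjn⟩ := Option.isSome_iff_exists.mp ((PySem.List.index?_isSome_iff arr w).mpr hw)
    obtain ⟨hjnlt, hjget, -⟩ := PySem.List.getElem_of_index?_eq_some hjn
    have hcast : (((jn : Nat) : Int) + 1) = (((jn + 1 : Nat)) : Int) := by omega
    have hnot : w ∉ arr.drop (jn + 1) := by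
      intro hmem'
      obtain ⟨m, hm, hget⟩ := List.getElem_of_mem hmem'
      rw [List.getElem_drop] at hget
      have hm2 : jn + 1 + m < arr.length := by simp at hm; omega
      exact nodup_ne arr h jn (jn + 1 + m) hjnlt hm2 (by omega) (hjget.trans hget.symm)
    rw [dsLoopB]
    simp only [hjn, Option.getD_some, hcast, PySem.List.slice_from_natCast]
    rw [if_neg hnot]
    exact ih best (fun x hx => hmem x (by simp [hx]))

lemma dsLoopB_eval (arr p s' : List Int) (v : Int) (j0 : Nat)
    (harr : arr = p ++ v :: s') (hp : p.Nodup)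
    (hj0 : PySem.List.index? p v = some j0) :
    ∀ (vs : List Int) (best : Option (Int × Int)), (∀ w ∈ vs, w ∈ arr) → vs.Nodup →
      ((v ∈ vs ∧ ∀ b, best = some b → (p.length : Int) < b.2)
        ∨ (v ∉ vs ∧ best = some ((j0 : Int), (p.length : Int)))) →
      dsLoopB arr vs best = some ((j0 : Int), (p.length : Int)) := by
  obtain ⟨hj0lt, hgetv, -⟩ := PySem.List.getElem_of_index?_eq_some hj0
  have hv : v ∈ p := hgetv ▸ List.getElem_mem hj0lt
  have hvarr : PySem.List.index? arr v = some j0 := by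
    rw [harr, PySem.List.index?_append_of_mem _ hv, hj0]
  have hplen : p.length < arr.length := by rw [harr]; simp
  have hvat : arr[p.length]? = some v := by
    rw [harr, List.getElem?_append_right (Nat.le_refl _)]
    simp
  have hleft : ∀ (i : Nat), i < p.length → arr[i]? = p[i]? := by
    intro i h
    rw [harr]
    exact List.getElem?_append_left h
  have hdropv : arr.drop (j0 + 1) = p.drop (j0 + 1) ++ v :: s' := by
    rw [harr, List.drop_append_of_le_length (by omega)]
  have hvnotpd : v ∉ p.drop (j0 + 1) := by
    intro hm
    obtain ⟨m, hm', hg⟩ := List.getElem_of_mem hm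
    rw [List.getElem_drop] at hg
    have hm2 : j0 + 1 + m < p.length := by simp at hm'; omega
    exact nodup_ne p hp j0 (j0 + 1 + m) hj0lt hm2 (by omega) (hgetv.trans hg.symm)
  have hvrest : v ∈ arr.drop (j0 + 1) := by
    rw [hdropv]; exact List.mem_append_right _ (List.mem_cons_self)
  have hS1 : PySem.List.index? (arr.drop (j0 + 1)) v = some (p.length - (j0 + 1)) := by
    rw [hdropv]
    exact (PySem.List.index?_eq_some_iff _ v _).mpr
      ⟨p.drop (j0 + 1), s', rfl, by simp, hvnotpd⟩
  intro vs
  induction vs with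
  | nil =>
    intro best _ _ hinv
    rcases hinv with ⟨hvin, -⟩ | ⟨-, hbest⟩
    · cases hvin
    · simpa [dsLoopB] using hbest
  | cons w ws ih =>
    intro best hmem hnd hinv
    have hw : w ∈ arr := hmem w (by simp)
    obtain ⟨jn, hjn⟩ := Option.isSome_iff_exists.mp ((PySem.List.index?_isSome_iff arr w).mpr hw)
    obtain ⟨hjnlt, hjget, -⟩ := PySem.List.getElem_of_index?_eq_some hjn
    have hcast : (((jn : Nat) : Int) + 1) = (((jn + 1 : Nat)) : Int) := by omega
    have hmemws : ∀ x ∈ ws, x ∈ arr := fun x hx => hmem x (by simp [hx])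
    rw [dsLoopB]
    simp only [hjn, Option.getD_some, hcast, PySem.List.slice_from_natCast]
    by_cases hrest : w ∈ arr.drop (jn + 1)
    · rw [if_pos hrest]
      obtain ⟨mn, hmn⟩ := Option.isSome_iff_exists.mp
        ((PySem.List.index?_isSome_iff (arr.drop (jn + 1)) w).mpr hrest)
      obtain ⟨hmnlt, hmget, -⟩ := PySem.List.getElem_of_index?_eq_some hmn
      rw [List.getElem_drop] at hmget
      have hknlt : jn + 1 + mn < arr.length := by simp at hmnlt; omega
      have hmget? : arr[jn + 1 + mn]? = some w := by
        rw [List.getElem?_eq_getElem hknlt, hmget]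
      have hjget? : arr[jn]? = some w := by
        rw [List.getElem?_eq_getElem hjnlt, hjget]
      have hC1 : ¬ (jn + 1 + mn < p.length) := by
        intro hlt
        have e1 : p[jn]? = some w := (hleft jn (by omega)).symm.trans hjget?
        have e2 : p[jn + 1 + mn]? = some w := (hleft (jn + 1 + mn) hlt).symm.trans hmget?
        rw [List.getElem?_eq_getElem (by omega : jn < p.length)] at e1
        rw [List.getElem?_eq_getElem hlt] at e2
        exact nodup_ne p hp jn (jn + 1 + mn) (by omega) hlt (by omega)
          ((Option.some.inj e1).trans (Option.some.inj e2).symm)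
      have hC2 : jn + 1 + mn = p.length → w = v := by
        intro he
        rw [he] at hmget?
        exact Option.some.inj (hmget?.symm.trans hvat)
      rw [hmn]
      simp only [Option.getD_some]
      have hkcast : ((((jn + 1 : Nat)) : Int) + ((mn : Nat) : Int)) = (((jn + 1 + mn : Nat)) : Int) := by omega
      rcases hinv with ⟨hvin, hbest⟩ | ⟨hvnot, hbesteq⟩
      · by_cases hwv : w = v
        · subst hwv
          have hj : jn = j0 := by rw [hjn] at hvarr; exact Option.some.inj hvarr
          subst hj
          have hm : mn = p.length - (jn + 1) := by rw [hmn] at hS1; exact (Option.some.inj hS1)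
          subst hm
          have hkval : (((jn + 1 : Nat)) : Int) + (((p.length - (jn + 1) : Nat)) : Int)
              = ((p.length : Nat) : Int) := by omega
          simp only [hkval]
          rw [dsB_if_take ((jn : Nat) : Int) ((p.length : Nat) : Int) best hbest]
          have hvnotws : w ∉ ws := (List.nodup_cons.mp hnd).1
          exact ih _ hmemws (List.nodup_cons.mp hnd).2 (Or.inr ⟨hvnotws, rfl⟩)
        · have hvws : v ∈ ws := by
            rcases List.mem_cons.mp hvin with h' | h'
            · exact absurd h'.symm hwv
            · exact h'
          have hkgt : (p.length : Int) < ((jn : Nat) : Int) + 1 + ((mn : Nat) : Int) := by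
            have : jn + 1 + mn ≠ p.length := fun he => hwv (hC2 he)
            omega
          refine ih _ hmemws (List.nodup_cons.mp hnd).2 (Or.inl ⟨hvws, ?_⟩)
          intro b hb
          split at hb
          · cases hb
            push_cast
            omega
          · exact hbest b hb
      · have hwv : w ≠ v := fun he => hvnot (he ▸ List.mem_cons_self)
        subst hbesteq
        have hkn : ¬ (((jn : Nat) : Int) + 1 + ((mn : Nat) : Int) < ((p.length : Nat) : Int)) := by
          have : jn + 1 + mn ≠ p.length := fun he => hwv (hC2 he)
          omega
        have hbf : dsBetter (((jn + 1 : Nat) : Int) + ((mn : Nat) : Int))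
            (some ((j0 : Int), (p.length : Int))) = false := by
          simp only [dsBetter, decide_eq_false_iff_not]
          omega
        rw [hbf, if_neg Bool.false_ne_true]
        exact ih _ hmemws (List.nodup_cons.mp hnd).2
          (Or.inr ⟨fun h' => hvnot (by simp [h']), rfl⟩)
    · rw [if_neg hrest]
      rcases hinv with ⟨hvin, hbest⟩ | ⟨hvnot, hbesteq⟩
      · have hwv : w ≠ v := by
          intro he
          subst he
          rw [hjn] at hvarr
          cases Option.some.inj hvarr
          exact hrest hvrest
        have hvws : v ∈ ws := by
          rcases List.mem_cons.mp hvin with h' | h'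
          · exact absurd h'.symm hwv
          · exact h'
        exact ih _ hmemws (List.nodup_cons.mp hnd).2 (Or.inl ⟨hvws, hbest⟩)
      · exact ih _ hmemws (List.nodup_cons.mp hnd).2
          (Or.inr ⟨fun h' => hvnot (by simp [h']), hbesteq⟩)

-- ===== VERDICT (by name: the statement is the Claim_ definition above) =====
theorem duplicate_sandwich_spec : Claim_equal_duplicate_sandwich := by
  intro arr _
  unfold Spec_duplicate_sandwich
  rcases ds_split arr with hnd | ⟨p, v, s', harr, hp, hv⟩
  · have hA : duplicate_sandwich arr = none := by
      simpa [duplicate_sandwich] using dsLoopA_nodup arr hnd arr [] (by simp)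
    have hB : dsLoopB arr (PySem.List.dedup arr) none = none := by
      exact dsLoopB_nodup arr hnd (PySem.List.dedup arr) none
        (by intro w hw; rw [PySem.List.dedup_eq_ofList] at hw; exact (PySem.Set.mem_ofList arr w).mp hw)
    have h2 : dsLoopB arr (PySem.Set.ofList arr) none = none := by
      rw [← PySem.List.dedup_eq_ofList]; exact hB
    rw [hA]
    simp [duplicate_sandwich_alt, h2]
  · obtain ⟨j0, hj0⟩ := Option.isSome_iff_exists.mp ((PySem.List.index?_isSome_iff p v).mpr hv)
    have hA : duplicate_sandwich arr
        = some (PySem.List.slice arr (some ((j0 : Int) + 1)) (some (p.length : Int))) := by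
      have := dsLoopA_eval arr p s' v j0 harr hp hj0 p [] (by simp)
      simpa [duplicate_sandwich, harr] using this
    have hB : dsLoopB arr (PySem.List.dedup arr) none = some ((j0 : Int), (p.length : Int)) := by
      refine dsLoopB_eval arr p s' v j0 harr hp hj0 (PySem.List.dedup arr) none
        (by intro w hw; rw [PySem.List.dedup_eq_ofList] at hw; exact (PySem.Set.mem_ofList arr w).mp hw)
        (by rw [PySem.List.dedup_eq_ofList]; exact PySem.Set.nodup_ofList arr)
        (Or.inl ⟨?_, by intro b hb; cases hb⟩)
      rw [PySem.List.dedup_eq_ofList]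
      exact (PySem.Set.mem_ofList arr v).mpr (by rw [harr]; exact List.mem_append_left _ hv)
    have hB' : dsLoopB arr (PySem.Set.ofList arr) none = some ((j0 : Int), (p.length : Int)) := by
      rw [← PySem.List.dedup_eq_ofList]; exact hB
    rw [hA]
    simp [duplicate_sandwich_alt, hB']
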